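-- pv_equiv track=rewrite | github.com/batukochan/VSCode-Ecodation | 09_ornekler/proje2/veriYapilari.py | enYuksekAdetli
-- ===== SOURCE A (Python) =====
-- def sozluksirala(sozluk: dict):
--
--     # value sırası
--     siraliListe = sorted(sozluk.items(), key = lambda x: x[1], reverse=True)
--     return siraliListe
--
-- def enYuksekAdetli(liste: list, n=20):
--
--     # sözlük olarak dönecek
--     sozluk = {
--         kelime: liste.count(kelime)
--         for kelime in liste
--     }
--
--     siraliListe = sozluksirala(sozluk)
--     siraliListeTopn = siraliListe[:n]
--
--     return dict(siraliListeTopn)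
-- ===== SOURCE B (Python) =====
-- def enYuksekAdetli(liste: list, n=20):
--     # one counting pass, then bucket the words by count and walk counts from the max down
--     sayac = {}
--     for kelime in liste:
--         sayac[kelime] = sayac.get(kelime, 0) + 1
--     kovalar = {}
--     for cift in sayac.items():
--         kovalar.setdefault(cift[1], []).append(cift)
--     sirali = []
--     for c in range(max(sayac.values(), default=0), 0, -1):
--         sirali += kovalar.get(c, [])
--     return dict(sirali[:n])
-- ===== Notes on version B (the rewrite author's own statement) =====
-- stated objective: faster
-- what changed: Replaces A's per-element liste.count (quadratic counting) plus stable comparison sort by one get+1 counting pass, count-indexed buckets, and a walk of the count values from the maximum down to 1 (a counting/bucket sort), slicing [:n] as before.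
import Mathlib
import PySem

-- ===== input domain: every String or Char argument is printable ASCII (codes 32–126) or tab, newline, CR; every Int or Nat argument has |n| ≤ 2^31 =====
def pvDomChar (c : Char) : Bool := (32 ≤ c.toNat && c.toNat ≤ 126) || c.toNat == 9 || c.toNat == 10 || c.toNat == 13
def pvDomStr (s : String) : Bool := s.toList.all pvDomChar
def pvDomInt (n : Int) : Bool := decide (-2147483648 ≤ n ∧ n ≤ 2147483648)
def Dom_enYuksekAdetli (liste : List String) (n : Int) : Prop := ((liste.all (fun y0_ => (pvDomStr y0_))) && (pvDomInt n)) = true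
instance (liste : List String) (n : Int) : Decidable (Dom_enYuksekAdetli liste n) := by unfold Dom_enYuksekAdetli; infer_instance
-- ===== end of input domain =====

-- B replaces the comparison sort of A by a counting pass plus count-indexed buckets walked
-- from the maximal count down (alternative decomposition; same return value).

-- ===== PORT A =====
def sozluksirala (sozluk : PySem.Dict String Int) : List (String × Int) :=
  PySem.List.sorted sozluk.items (fun x => x.2) true

def enYuksekAdetli (liste : List String) (n : Int) : List (String × Int) :=
  let sozluk : PySem.Dict String Int :=
    liste.foldl (fun d kelime => d.insert kelime ((PySem.List.count liste kelime : Nat) : Int)) PySem.Dict.empty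
  let siraliListe := sozluksirala sozluk
  let siraliListeTopn := PySem.List.slice siraliListe none (some n)
  (PySem.Dict.ofList siraliListeTopn).items

-- ===== PORT B =====
def enYuksekAdetli_alt (liste : List String) (n : Int) : List (String × Int) :=
  let sayac : PySem.Dict String Int :=
    liste.foldl (fun d kelime => d.insert kelime (d.getD kelime 0 + 1)) PySem.Dict.empty
  -- kovalar.setdefault(cift[1], []).append(cift)  ==  modify cift.2 [] (· ++ [cift])  (exact)
  let kovalar : PySem.Dict Int (List (String × Int)) :=
    sayac.items.foldl (fun d cift => d.modify cift.2 [] (fun b => b ++ [cift])) PySem.Dict.empty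
  let sirali := (PySem.List.pyRange (PySem.List.maxD sayac.values (fun x => x) 0) 0 (-1)).foldl
      (fun acc c => acc ++ kovalar.getD c []) []
  (PySem.Dict.ofList (PySem.List.slice sirali none (some n))).items

-- ===== PRECONDITION & SPEC =====
def Spec_enYuksekAdetli (liste : List String) (n : Int) (out : List (String × Int)) : Prop := out = enYuksekAdetli_alt liste n
instance (liste : List String) (n : Int) (out : List (String × Int)) : Decidable (Spec_enYuksekAdetli liste n out) := by unfold Spec_enYuksekAdetli; infer_instance

-- ===== CLAIM (what is proved, stated in full; the proofs are below) =====
def Claim_equal_enYuksekAdetli : Prop := ∀ (liste : List String) (n : Int), Dom_enYuksekAdetli liste n → Spec_enYuksekAdetli liste n (enYuksekAdetli liste n)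

-- ===== LEMMAS AND PROOFS =====

-- A's dict comprehension (value a function of the key alone) lists each distinct key once, in
-- first-appearance order, paired with its value.
lemma items_insert_keyfun (f : String → Int) :
    ∀ (l : List String) (m : List String) (d : PySem.Dict String Int),
      d.items = m.map (fun k => (k, f k)) →
      (l.foldl (fun d k => d.insert k (f k)) d).items
        = (l.foldl PySem.Set.add m).map (fun k => (k, f k)) := by
  intro l
  induction l with
  | nil => intro m d h; simpa using h
  | cons x t ih =>
    intro m d h
    have hkeys : d.keys = m := by
      simp [PySem.Dict.keys, h, List.map_map, Function.comp_def]
    by_cases hx : x ∈ m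
    · have hc : d.contains x = true := by
        rw [PySem.Dict.contains_eq_decide_mem_keys, hkeys]; simpa using hx
      have hitems : (d.insert x (f x)).items = m.map (fun k => (k, f k)) := by
        rw [PySem.Dict.items_insert_of_contains d (f x) hc, h, List.map_map]
        apply List.map_congr_left
        intro k _
        by_cases hk : k = x <;> simp [hk, Function.comp]
      have hadd : PySem.Set.add m x = m := by
        simp [PySem.Set.add, PySem.Set.contains, hx]
      simp only [List.foldl_cons, hadd]
      exact ih m _ hitems
    · have hc : d.contains x = false := by
        rw [PySem.Dict.contains_eq_decide_mem_keys, hkeys]; simpa using hx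
      have hitems : (d.insert x (f x)).items = (m ++ [x]).map (fun k => (k, f k)) := by
        rw [PySem.Dict.items_insert_of_not_contains d (f x) hc, h]; simp
      have hadd : PySem.Set.add m x = m ++ [x] := by
        simp [PySem.Set.add, PySem.Set.contains, hx]
      simp only [List.foldl_cons, hadd]
      exact ih (m ++ [x]) _ hitems

-- B's bucket dict: the bucket of count c holds exactly the processed pairs with second component c.
lemma bucket_getD :
    ∀ (l : List (String × Int)) (d : PySem.Dict Int (List (String × Int))) (c : Int),
      (l.foldl (fun d p => d.modify p.2 [] (fun b => b ++ [p])) d).getD c []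
        = d.getD c [] ++ l.filter (fun p => p.2 == c) := by
  intro l
  induction l with
  | nil => intro d c; simp
  | cons p t ih =>
    intro d c
    simp only [List.foldl_cons]
    rw [ih]
    rw [PySem.Dict.getD_modify]
    by_cases hc : c = p.2
    · subst hc; simp
    · simp [hc, show ¬ (p.2 == c) = true by simpa using fun h => hc h.symm]

lemma flatMap_congr_mem {α β : Type} {l : List α} {f g : α → List β}
    (h : ∀ a ∈ l, f a = g a) : l.flatMap f = l.flatMap g := by
  induction l with
  | nil => rfl
  | cons x t ih =>
    simp only [List.flatMap_cons]
    rw [h x (by simp), ih (fun a ha => h a (by simp [ha]))]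

lemma insertBy_append_of_not {α : Type} (before : α → α → Bool) (x : α) :
    ∀ (l1 l2 : List α), (∀ y ∈ l1, before x y = false) →
      PySem.List.insertBy before x (l1 ++ l2) = l1 ++ PySem.List.insertBy before x l2 := by
  intro l1
  induction l1 with
  | nil => intro l2 _; rfl
  | cons y ys ih =>
    intro l2 h
    have hy : before x y = false := h y (by simp)
    simp only [List.cons_append, PySem.List.insertBy, hy]
    simp only [Bool.false_eq_true, if_false, List.cons.injEq, true_and]
    exact ih l2 (fun z hz => h z (by simp [hz]))

lemma insertBy_of_forall_before {α : Type} (before : α → α → Bool) (x : α) :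
    ∀ (l : List α), (∀ y ∈ l, before x y = true) →
      PySem.List.insertBy before x l = x :: l := by
  intro l h
  cases l with
  | nil => rfl
  | cons y ys => simp [PySem.List.insertBy, h y (by simp)]

-- Inserting an element whose key occurs in the strictly decreasing count list lands at the end
-- of its own bucket.
lemma insertBy_flatMap_buckets {α : Type} (key : α → Int) :
    ∀ (cs : List Int) (bk : Int → List α) (x : α),
      (∀ c, ∀ y ∈ bk c, key y = c) → cs.Pairwise (· > ·) → key x ∈ cs →
      PySem.List.insertBy (fun a b => decide (key b < key a)) x (cs.flatMap bk)
        = cs.flatMap (fun c => if c = key x then bk c ++ [x] else bk c) := by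
  intro cs
  induction cs with
  | nil => intro bk x _ _ hmem; simp at hmem
  | cons c cs' ih =>
    intro bk x hbk hp hmem
    have hgt : ∀ c' ∈ cs', c > c' := (List.pairwise_cons.mp hp).1
    have hp' : cs'.Pairwise (· > ·) := (List.pairwise_cons.mp hp).2
    by_cases hc : key x = c
    · have hpre : ∀ y ∈ bk c, (fun a b => decide (key b < key a)) x y = false := by
        intro y hy
        have := hbk c y hy
        simp [this, hc]
      have hsuf : ∀ y ∈ cs'.flatMap bk, (fun a b => decide (key b < key a)) x y = true := by
        intro y hy
        rcases List.mem_flatMap.mp hy with ⟨c', hc', hy'⟩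
        have := hbk c' y hy'
        have := hgt c' hc'
        simp only [decide_eq_true_eq]
        omega
      rw [List.flatMap_cons, insertBy_append_of_not _ _ _ _ hpre,
          insertBy_of_forall_before _ _ _ hsuf]
      rw [List.flatMap_cons, if_pos hc.symm]
      have : cs'.flatMap (fun c' => if c' = key x then bk c' ++ [x] else bk c') = cs'.flatMap bk := by
        apply flatMap_congr_mem
        intro c' hc'
        have : c > c' := hgt c' hc'
        rw [if_neg (by omega)]
      rw [this]
      simp
    · have hmem' : key x ∈ cs' := by
        rcases List.mem_cons.mp hmem with h | h
        · exact absurd h hc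
        · exact h
      have hxlt : key x < c := hgt _ hmem'
      have hpre : ∀ y ∈ bk c, (fun a b => decide (key b < key a)) x y = false := by
        intro y hy
        have := hbk c y hy
        simp only [decide_eq_false_iff_not]
        omega
      rw [List.flatMap_cons, insertBy_append_of_not _ _ _ _ hpre,
          ih bk x hbk hp' hmem']
      rw [List.flatMap_cons, if_neg (fun h => hc h.symm)]

-- The stable reverse insertion sort of a list with keys drawn from a strictly decreasing
-- count list is the concatenation of the filter-buckets in that order.
lemma foldl_insert_bucketed {α : Type} (key : α → Int) (cs : List Int)
    (hp : cs.Pairwise (· > ·)) :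
    ∀ (l pre : List α), (∀ p ∈ l, key p ∈ cs) →
      l.foldl (fun acc x => PySem.List.insertBy (fun a b => decide (key b < key a)) x acc)
          (cs.flatMap (fun c => pre.filter (fun p => key p == c)))
        = cs.flatMap (fun c => (pre ++ l).filter (fun p => key p == c)) := by
  intro l
  induction l with
  | nil => intro pre _; simp
  | cons x t ih =>
    intro pre hmem
    simp only [List.foldl_cons]
    rw [insertBy_flatMap_buckets key cs (fun c => pre.filter (fun p => key p == c)) x
        (by intro c y hy; simpa using (List.of_mem_filter hy)) hp (hmem x (by simp))]
    have hstep : (cs.flatMap fun c => if c = key x then pre.filter (fun p => key p == c) ++ [x]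
            else pre.filter (fun p => key p == c))
        = cs.flatMap (fun c => (pre ++ [x]).filter (fun p => key p == c)) := by
      apply flatMap_congr_mem
      intro c _
      rw [List.filter_append]
      by_cases hcx : c = key x
      · subst hcx; simp
      · have hne : (key x == c) = false := by
          rw [beq_eq_false_iff_ne]; exact fun h => hcx h.symm
        simp [hne]
        exact hcx
    rw [hstep, ih (pre ++ [x]) (fun p hp' => hmem p (by simp [hp']))]
    simp

lemma sorted_bucketed {α : Type} (key : α → Int) (cs : List Int) (l : List α)
    (hp : cs.Pairwise (· > ·)) (hmem : ∀ p ∈ l, key p ∈ cs) :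
    PySem.List.sorted l key true = cs.flatMap (fun c => l.filter (fun p => key p == c)) := by
  rw [PySem.List.sorted_rev_eq_foldl_insertBy]
  have h := foldl_insert_bucketed key cs hp l [] hmem
  simpa [show cs.flatMap (fun _ : Int => ([] : List α)) = [] from by
    induction cs <;> simp_all] using h

lemma pyRange_down (m : Int) :
    PySem.List.pyRange m 0 (-1) = (List.range m.toNat).map (fun j : Nat => m - (j : Int)) := by
  unfold PySem.List.pyRange
  norm_num
  rw [show (if 0 < m then m.toNat else 0) = m.toNat by split_ifs with h <;> omega]
  apply List.map_congr_left
  intro j _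
  omega

lemma mem_pyRange_down {m c : Int} : c ∈ PySem.List.pyRange m 0 (-1) ↔ 0 < c ∧ c ≤ m := by
  rw [pyRange_down]
  simp only [List.mem_map, List.mem_range]
  constructor
  · rintro ⟨j, hj, rfl⟩; omega
  · rintro ⟨h1, h2⟩; exact ⟨(m - c).toNat, by omega, by omega⟩

lemma pairwise_pyRange_down (m : Int) : (PySem.List.pyRange m 0 (-1)).Pairwise (· > ·) := by
  rw [pyRange_down, List.pairwise_map]
  exact List.pairwise_lt_range.imp (by intro a b h; simp; omega)

-- ===== VERDICT (by name: the statement is the Claim_ definition above) =====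
theorem enYuksekAdetli_spec : Claim_equal_enYuksekAdetli := by
  intro liste n _
  simp only [Spec_enYuksekAdetli, enYuksekAdetli, enYuksekAdetli_alt, sozluksirala]
  -- the common items list: distinct words in first-appearance order with their counts
  set I : List (String × Int) :=
    (PySem.Set.ofList liste).map (fun k => (k, (List.count k liste : Int))) with hI
  -- A's comprehension dict lists exactly I
  have hA : (liste.foldl (fun d kelime =>
        d.insert kelime ((PySem.List.count liste kelime : Nat) : Int)) PySem.Dict.empty).items = I := by
    have h := items_insert_keyfun (fun k => ((PySem.List.count liste k : Nat) : Int)) liste []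
        PySem.Dict.empty (by rfl)
    rw [h, ← PySem.Set.ofList_eq_foldl, hI]
    simp [PySem.List.count_eq]
  -- B's counting dict is exactly the dictionary with item list I
  have hBd : (liste.foldl (fun d kelime =>
        d.insert kelime (d.getD kelime 0 + 1)) PySem.Dict.empty) = PySem.Dict.mk I := by
    rw [PySem.Dict.foldl_insert_getD_add_one_eq_counter]
    apply PySem.Dict.ext
    rw [PySem.Dict.items_counter, hI]
  rw [hA, hBd]
  -- B's buckets hold exactly the filter-buckets of I
  have hbk : ∀ c : Int,
      (I.foldl (fun d cift => d.modify cift.2 [] (fun b => b ++ [cift])) PySem.Dict.empty).getD c []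
        = I.filter (fun p => p.2 == c) := by
    intro c
    rw [bucket_getD]
    rfl
  -- the maximal count bounds every count of I
  set M : Int := PySem.List.maxD ((PySem.Dict.mk I).values) (fun x => x) 0 with hM
  have hmem : ∀ p ∈ I, p.2 ∈ PySem.List.pyRange M 0 (-1) := by
    intro p hp
    rw [mem_pyRange_down]
    constructor
    · rcases List.mem_map.mp hp with ⟨k, hk, rfl⟩
      have hk' : k ∈ liste := (PySem.Set.mem_ofList liste k).mp hk
      have := List.count_pos_iff.mpr hk'
      simpa using this
    · have hv : p.2 ∈ I.map (fun x => x.2) := List.mem_map.mpr ⟨p, hp, rfl⟩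
      rcases h : PySem.List.max? (I.map (fun x => x.2)) (fun x => x) with _ | mv
      · rw [PySem.List.max?_eq_none_iff] at h
        rw [h] at hv; simp at hv
      · have hle := PySem.List.max?_isMax h p.2 hv
        have hMv : M = mv := by
          rw [hM]; simp [PySem.List.maxD, PySem.Dict.values, h]
        rw [hMv]; exact hle
  -- A's sorted list equals B's bucket walk
  rw [PySem.List.foldl_append_eq_flatMap]
  have hsorted := sorted_bucketed (fun p : String × Int => p.2) (PySem.List.pyRange M 0 (-1)) I
      (pairwise_pyRange_down M) hmem
  rw [hsorted]
  simp only [hbk, List.nil_append]
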